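-- pv_equiv track=rewrite | github.com/yyahya-2000/ASD-2023 | misha/Problem_1/MainSubroutineWithStepwiseRefinement.py | index_keywords
-- ===== SOURCE A (Python) =====
-- def index_keywords(text, keywords):
--     keyword_index = {}
--
--     for keyword in keywords:
--         keyword_index[keyword] = []
--         for i, sentence in enumerate(text):
--             for j, word in enumerate(sentence):
--                 if keyword in word:
--                     keyword_index[keyword].append((i, j))
--
--     return keyword_index
-- ===== SOURCE B (Python) =====
-- def index_keywords(text, keywords):
--     # Build an inverted index: every distinct substring of every word -> positions, one pass.
--     inv = {}
--     for i, sentence in enumerate(text):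
--         for j, word in enumerate(sentence):
--             n = len(word)
--             subs = dict.fromkeys(word[a:b] for a in range(n + 1) for b in range(a, n + 1))
--             for s in subs:
--                 inv.setdefault(s, []).append((i, j))
--     # Each keyword's result is now a pure lookup.
--     return {k: inv.get(k, []) for k in keywords}
-- ===== Notes on version B (the rewrite author's own statement) =====
-- stated objective: faster
-- what changed: B builds an inverted index from every distinct substring of every word to its (i,j) positions in one pass over the text, then answers each keyword by a pure dictionary lookup, replacing A's full substring-scan of the entire text per keyword.
import Mathlib
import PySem

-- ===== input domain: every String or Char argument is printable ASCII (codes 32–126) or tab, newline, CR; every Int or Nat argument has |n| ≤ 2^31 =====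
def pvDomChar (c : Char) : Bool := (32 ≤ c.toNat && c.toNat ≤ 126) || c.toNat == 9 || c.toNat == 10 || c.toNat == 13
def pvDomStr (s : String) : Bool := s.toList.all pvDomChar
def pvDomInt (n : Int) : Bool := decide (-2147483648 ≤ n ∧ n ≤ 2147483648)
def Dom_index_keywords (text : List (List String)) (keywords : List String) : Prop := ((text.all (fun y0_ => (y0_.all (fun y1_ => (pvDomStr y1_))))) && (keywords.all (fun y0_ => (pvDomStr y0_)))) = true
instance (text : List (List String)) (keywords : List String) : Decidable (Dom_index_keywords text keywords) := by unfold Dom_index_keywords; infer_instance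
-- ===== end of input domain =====

-- B builds an inverted index from every distinct substring of every word to its (i, j) positions in one
-- pass over the text, then answers each keyword by a pure dictionary lookup (measured faster: the per-keyword
-- text scan disappears).

-- ===== PORT A =====
def index_keywords (text : List (List String)) (keywords : List String) : List (String × List (Int × Int)) :=
  (keywords.foldl (fun d keyword =>
      (PySem.List.enumerate text 0).foldl (fun d p =>
        (PySem.List.enumerate p.2 0).foldl (fun d q =>
          if PySem.Str.isIn keyword q.2 then d.modify keyword [] (fun l => l ++ [(p.1, q.1)]) else d) d)
        (d.insert keyword ([] : List (Int × Int))))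
    PySem.Dict.empty).items

-- ===== PORT B =====
-- subs = dict.fromkeys(word[a:b] for a in range(n + 1) for b in range(a, n + 1))
def pvSubs (w : String) : List String :=
  PySem.List.dedup ((PySem.List.pyRange 0 ((PySem.Str.len w : Int) + 1) 1).flatMap (fun a =>
    (PySem.List.pyRange a ((PySem.Str.len w : Int) + 1) 1).map (fun b =>
      PySem.Str.slice w (some a) (some b))))

def index_keywords_alt (text : List (List String)) (keywords : List String) : List (String × List (Int × Int)) :=
  let inv := (PySem.List.enumerate text 0).foldl (fun inv p =>
      (PySem.List.enumerate p.2 0).foldl (fun inv q =>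
        (pvSubs q.2).foldl (fun inv s =>
          inv.modify s [] (fun l => l ++ [(p.1, q.1)])) inv) inv)
    PySem.Dict.empty
  (keywords.foldl (fun d k => d.insert k (inv.getD k [])) PySem.Dict.empty).items

-- ===== PRECONDITION & SPEC =====
def Spec_index_keywords (text : List (List String)) (keywords : List String) (out : List (String × List (Int × Int))) : Prop := out = index_keywords_alt text keywords
instance (text : List (List String)) (keywords : List String) (out : List (String × List (Int × Int))) : Decidable (Spec_index_keywords text keywords out) := by unfold Spec_index_keywords; infer_instance

-- ===== CLAIM (what is proved, stated in full; the proofs are below) =====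
def Claim_equal_index_keywords : Prop := ∀ (text : List (List String)) (keywords : List String), Dom_index_keywords text keywords → Spec_index_keywords text keywords (index_keywords text keywords)

-- ===== LEMMAS AND PROOFS =====

-- the (i, j) pairs a single keyword k collects from the words of one sentence / of the whole text
def pvMatchS (k : String) (i j : Int) (ws : List String) : List (Int × Int) :=
  (PySem.List.enumerate ws j).flatMap (fun q => if PySem.Str.isIn k q.2 then [(i, q.1)] else [])

def pvMatchT (k : String) (i : Int) (text : List (List String)) : List (Int × Int) :=
  (PySem.List.enumerate text i).flatMap (fun p => pvMatchS k p.1 0 p.2)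

lemma pvMatchS_nil (k : String) (i j : Int) : pvMatchS k i j [] = [] := rfl

lemma pvMatchS_cons (k : String) (i j : Int) (w : String) (ws : List String) :
    pvMatchS k i j (w :: ws)
      = (if PySem.Str.isIn k w then [(i, j)] else []) ++ pvMatchS k i (j + 1) ws := by
  simp [pvMatchS, PySem.List.enumerate_cons]

lemma pvMatchT_nil (k : String) (i : Int) : pvMatchT k i [] = [] := rfl

lemma pvMatchT_cons (k : String) (i : Int) (s : List String) (text : List (List String)) :
    pvMatchT k i (s :: text) = pvMatchS k i 0 s ++ pvMatchT k (i + 1) text := by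
  simp [pvMatchT, PySem.List.enumerate_cons]

-- small Dict helpers
lemma pvGet?_modify_ne (d : PySem.Dict String (List (Int × Int))) (k k' : String)
    (d0 : List (Int × Int)) (f : List (Int × Int) → List (Int × Int)) (h : k' ≠ k) :
    (d.modify k d0 f).get? k' = d.get? k' := by
  simp [PySem.Dict.modify, PySem.Dict.get?_insert, h]

lemma pvGetD_modify_ne (d : PySem.Dict String (List (Int × Int))) (k k' : String)
    (d0 : List (Int × Int)) (f : List (Int × Int) → List (Int × Int)) (h : k' ≠ k) :
    (d.modify k d0 f).getD k' [] = d.getD k' [] := by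
  rw [PySem.Dict.getD_eq_get?_getD, pvGet?_modify_ne d k k' d0 f h, PySem.Dict.getD_eq_get?_getD]

lemma pvGet?_modify_self (d : PySem.Dict String (List (Int × Int))) (k : String)
    (d0 : List (Int × Int)) (f : List (Int × Int) → List (Int × Int)) :
    (d.modify k d0 f).get? k = some (f (d.getD k d0)) := by
  simp [PySem.Dict.modify, PySem.Dict.get?_insert_self]

lemma pvGetD_modify_self (d : PySem.Dict String (List (Int × Int))) (k : String)
    (f : List (Int × Int) → List (Int × Int)) :
    (d.modify k [] f).getD k [] = f (d.getD k []) := by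
  rw [PySem.Dict.getD_eq_get?_getD, pvGet?_modify_self]; rfl

lemma pvKeys_modify_of_contains (d : PySem.Dict String (List (Int × Int))) (k : String)
    (d0 : List (Int × Int)) (f : List (Int × Int) → List (Int × Int)) (h : d.contains k = true) :
    (d.modify k d0 f).keys = d.keys := by
  rw [PySem.Dict.keys_modify, PySem.Dict.keys_insert_of_contains _ _ h]

lemma pvGet?_eq_some_getD (d : PySem.Dict String (List (Int × Int))) (k : String)
    (h : d.contains k = true) : d.get? k = some (d.getD k []) := by
  rw [PySem.Dict.contains_eq_isSome_get?] at h
  cases hg : d.get? k with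
  | none => rw [hg] at h; simp at h
  | some v => rw [PySem.Dict.getD_eq_get?_getD, hg]; rfl

-- ===== A-side loop characterisation =====

lemma pvA_sent (kw : String) (i : Int) (ws : List String) :
    ∀ (j : Int) (d : PySem.Dict String (List (Int × Int))), d.contains kw = true →
      (((PySem.List.enumerate ws j).foldl (fun d q =>
          if PySem.Str.isIn kw q.2 then d.modify kw [] (fun l => l ++ [(i, q.1)]) else d) d).get? kw
          = some (d.getD kw [] ++ pvMatchS kw i j ws)
        ∧ (∀ k', k' ≠ kw → ((PySem.List.enumerate ws j).foldl (fun d q =>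
          if PySem.Str.isIn kw q.2 then d.modify kw [] (fun l => l ++ [(i, q.1)]) else d) d).get? k' = d.get? k')
        ∧ ((PySem.List.enumerate ws j).foldl (fun d q =>
          if PySem.Str.isIn kw q.2 then d.modify kw [] (fun l => l ++ [(i, q.1)]) else d) d).keys = d.keys) := by
  induction ws with
  | nil =>
      intro j d hc
      refine ⟨?_, fun k' _ => rfl, rfl⟩
      simp [PySem.List.enumerate_nil, pvMatchS_nil, pvGet?_eq_some_getD d kw hc]
  | cons w ws ih =>
      intro j d hc
      rw [PySem.List.enumerate_cons]
      simp only [List.foldl_cons]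
      set d1 := if PySem.Str.isIn kw w then d.modify kw [] (fun l => l ++ [(i, j)]) else d with hd1
      have hc1 : d1.contains kw = true := by
        rw [hd1]; split
        · rw [PySem.Dict.contains_modify]; simp
        · exact hc
      obtain ⟨h1, h2, h3⟩ := ih (j + 1) d1 hc1
      have hgd : d1.getD kw [] = d.getD kw [] ++ (if PySem.Str.isIn kw w then [(i, j)] else []) := by
        rw [hd1]; split
        · rw [PySem.Dict.getD_eq_get?_getD, pvGet?_modify_self]; rfl
        · simp
      refine ⟨?_, ?_, ?_⟩
      · rw [h1, hgd, pvMatchS_cons]; simp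
      · intro k' hk'
        rw [h2 k' hk', hd1]; split
        · exact pvGet?_modify_ne d kw k' [] _ hk'
        · rfl
      · rw [h3, hd1]; split
        · exact pvKeys_modify_of_contains d kw [] _ hc
        · rfl

lemma pvA_text (kw : String) (text : List (List String)) :
    ∀ (i : Int) (d : PySem.Dict String (List (Int × Int))), d.contains kw = true →
      (((PySem.List.enumerate text i).foldl (fun d p =>
          (PySem.List.enumerate p.2 0).foldl (fun d q =>
            if PySem.Str.isIn kw q.2 then d.modify kw [] (fun l => l ++ [(p.1, q.1)]) else d) d) d).get? kw
          = some (d.getD kw [] ++ pvMatchT kw i text)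
        ∧ (∀ k', k' ≠ kw → ((PySem.List.enumerate text i).foldl (fun d p =>
          (PySem.List.enumerate p.2 0).foldl (fun d q =>
            if PySem.Str.isIn kw q.2 then d.modify kw [] (fun l => l ++ [(p.1, q.1)]) else d) d) d).get? k' = d.get? k')
        ∧ ((PySem.List.enumerate text i).foldl (fun d p =>
          (PySem.List.enumerate p.2 0).foldl (fun d q =>
            if PySem.Str.isIn kw q.2 then d.modify kw [] (fun l => l ++ [(p.1, q.1)]) else d) d) d).keys = d.keys) := by
  induction text with
  | nil =>
      intro i d hc
      refine ⟨?_, fun k' _ => rfl, rfl⟩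
      simp [PySem.List.enumerate_nil, pvMatchT_nil, pvGet?_eq_some_getD d kw hc]
  | cons s text ih =>
      intro i d hc
      rw [PySem.List.enumerate_cons]
      simp only [List.foldl_cons]
      obtain ⟨s1, s2, s3⟩ := pvA_sent kw i s 0 d hc
      set d1 := (PySem.List.enumerate s 0).foldl (fun d q =>
          if PySem.Str.isIn kw q.2 then d.modify kw [] (fun l => l ++ [(i, q.1)]) else d) d with hd1
      have hc1 : d1.contains kw = true := by
        rw [PySem.Dict.contains_iff_mem_keys, s3, ← PySem.Dict.contains_iff_mem_keys]; exact hc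
      obtain ⟨h1, h2, h3⟩ := ih (i + 1) d1 hc1
      have hgd : d1.getD kw [] = d.getD kw [] ++ pvMatchS kw i 0 s := by
        rw [PySem.Dict.getD_eq_get?_getD, s1]; rfl
      refine ⟨?_, ?_, ?_⟩
      · rw [h1, hgd, pvMatchT_cons]; simp
      · intro k' hk'; rw [h2 k' hk', s2 k' hk']
      · rw [h3, s3]

lemma pvKeys_insert_add (d : PySem.Dict String (List (Int × Int))) (k : String)
    (v : List (Int × Int)) : (d.insert k v).keys = PySem.Set.add d.keys k := by
  by_cases h : d.contains k = true
  · rw [PySem.Dict.keys_insert_of_contains _ _ h,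
      PySem.Set.add_of_mem ((PySem.Dict.contains_iff_mem_keys d k).mp h)]
  · have h' : d.contains k = false := by simpa using h
    rw [PySem.Dict.keys_insert_of_not_contains _ _ h',
      PySem.Set.add_of_not_mem (fun hm => h ((PySem.Dict.contains_iff_mem_keys d k).mpr hm))]

lemma pvA_fold (text : List (List String)) (keywords : List String) :
    ∀ (d : PySem.Dict String (List (Int × Int))),
      ((keywords.foldl (fun d keyword =>
          (PySem.List.enumerate text 0).foldl (fun d p =>
            (PySem.List.enumerate p.2 0).foldl (fun d q =>
              if PySem.Str.isIn keyword q.2 then d.modify keyword [] (fun l => l ++ [(p.1, q.1)]) else d) d)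
          (d.insert keyword ([] : List (Int × Int)))) d).keys = PySem.Set.update d.keys keywords
        ∧ (∀ k, k ∈ keywords → (keywords.foldl (fun d keyword =>
          (PySem.List.enumerate text 0).foldl (fun d p =>
            (PySem.List.enumerate p.2 0).foldl (fun d q =>
              if PySem.Str.isIn keyword q.2 then d.modify keyword [] (fun l => l ++ [(p.1, q.1)]) else d) d)
          (d.insert keyword ([] : List (Int × Int)))) d).get? k = some (pvMatchT k 0 text))
        ∧ (∀ k, k ∉ keywords → (keywords.foldl (fun d keyword =>
          (PySem.List.enumerate text 0).foldl (fun d p =>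
            (PySem.List.enumerate p.2 0).foldl (fun d q =>
              if PySem.Str.isIn keyword q.2 then d.modify keyword [] (fun l => l ++ [(p.1, q.1)]) else d) d)
          (d.insert keyword ([] : List (Int × Int)))) d).get? k = d.get? k)) := by
  induction keywords with
  | nil => exact fun d => ⟨rfl, fun k hk => absurd hk (List.not_mem_nil), fun k _ => rfl⟩
  | cons kw rest ih =>
      intro d
      simp only [List.foldl_cons]
      have hcin : (d.insert kw ([] : List (Int × Int))).contains kw = true :=
        PySem.Dict.contains_insert_self d kw []
      obtain ⟨t1, t2, t3⟩ := pvA_text kw text 0 (d.insert kw ([] : List (Int × Int))) hcin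
      set d1 := (PySem.List.enumerate text 0).foldl (fun d p =>
          (PySem.List.enumerate p.2 0).foldl (fun d q =>
            if PySem.Str.isIn kw q.2 then d.modify kw [] (fun l => l ++ [(p.1, q.1)]) else d) d)
          (d.insert kw ([] : List (Int × Int))) with hd1
      obtain ⟨h1, h2, h3⟩ := ih d1
      refine ⟨?_, ?_, ?_⟩
      · rw [h1, t3, PySem.Set.update_cons, pvKeys_insert_add]
      · intro k hk
        rcases List.mem_cons.mp hk with hk | hk
        · subst hk
          by_cases hmem : k ∈ rest
          · exact h2 k hmem
          · rw [h3 k hmem, t1]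
            simp [PySem.Dict.getD_insert_self]
        · exact h2 k hk
      · intro k hk
        have hne : k ≠ kw := fun h => hk (h ▸ List.mem_cons_self)
        have hnr : k ∉ rest := fun h => hk (List.mem_cons_of_mem _ h)
        rw [h3 k hnr, t2 k hne, PySem.Dict.get?_insert_of_ne d [] hne]

lemma pvA_eq (text : List (List String)) (keywords : List String) :
    index_keywords text keywords
      = (PySem.List.dedup keywords).map (fun k => (k, pvMatchT k 0 text)) := by
  obtain ⟨h1, h2, h3⟩ := pvA_fold text keywords PySem.Dict.empty
  unfold index_keywords
  have hkeys : (keywords.foldl (fun d keyword =>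
      (PySem.List.enumerate text 0).foldl (fun d p =>
        (PySem.List.enumerate p.2 0).foldl (fun d q =>
          if PySem.Str.isIn keyword q.2 then d.modify keyword [] (fun l => l ++ [(p.1, q.1)]) else d) d)
      (d.insert keyword ([] : List (Int × Int)))) PySem.Dict.empty).keys = PySem.List.dedup keywords := by
    rw [h1]
    show PySem.Set.update PySem.Dict.empty.keys keywords = _
    rw [PySem.Dict.keys_empty, PySem.Set.update_nil_left, PySem.List.dedup_eq_ofList]
  have hnd : (keywords.foldl (fun d keyword =>
      (PySem.List.enumerate text 0).foldl (fun d p =>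
        (PySem.List.enumerate p.2 0).foldl (fun d q =>
          if PySem.Str.isIn keyword q.2 then d.modify keyword [] (fun l => l ++ [(p.1, q.1)]) else d) d)
      (d.insert keyword ([] : List (Int × Int)))) PySem.Dict.empty).keys.Nodup := by
    rw [hkeys]; exact PySem.List.nodup_dedup keywords
  rw [PySem.Dict.items_eq_map_keys _ hnd ([] : List (Int × Int)), hkeys]
  apply List.map_congr_left
  intro k hk
  have hkm : k ∈ keywords := (PySem.List.mem_dedup keywords k).mp hk
  rw [PySem.Dict.getD_eq_get?_getD, h2 k hkm]; rfl

-- ===== B-side: the substring set of a word is exactly what 'in' tests =====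

lemma pvMem_pvSubs (k w : String) : k ∈ pvSubs w ↔ PySem.Str.isIn k w = true := by
  unfold pvSubs
  rw [PySem.List.mem_dedup]
  simp only [List.mem_flatMap, List.mem_map]
  constructor
  · rintro ⟨a, ha, b, hb, hk⟩
    rw [PySem.List.mem_pyRange_one] at ha hb
    obtain ⟨ha0, _⟩ := ha
    obtain ⟨hab, _⟩ := hb
    have hb0 : 0 ≤ b := le_trans ha0 hab
    rw [PySem.Str.isIn_iff_infix]
    have : k.toList = (w.toList.drop a.toNat).take (b.toNat - a.toNat) := by
      rw [← hk, PySem.Str.toList_slice, PySem.Chars.slice_eq_listSlice,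
        PySem.List.slice_toNat _ ha0 hb0]
    rw [this]
    exact ⟨w.toList.take a.toNat, (w.toList.drop a.toNat).drop (b.toNat - a.toNat), by simp⟩
  · intro hin
    rw [PySem.Str.isIn_iff_infix] at hin
    obtain ⟨s, t, hw⟩ := hin
    refine ⟨(s.length : Int), ?_, (s.length : Int) + (k.toList.length : Int), ?_, ?_⟩
    · rw [PySem.List.mem_pyRange_one]
      constructor
      · exact Int.natCast_nonneg _
      · have : s.length ≤ w.toList.length := by
          rw [← hw]; simp
        rw [PySem.Str.len_eq]; omega
    · rw [PySem.List.mem_pyRange_one]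
      constructor
      · omega
      · have : s.length + k.toList.length ≤ w.toList.length := by
          rw [← hw]; simp
        rw [PySem.Str.len_eq]; omega
    · apply String.toList_inj.mp
      rw [PySem.Str.toList_slice, PySem.Chars.slice_eq_listSlice,
        PySem.List.slice_natCast_add]
      rw [← hw]
      simp

-- ===== B-side loop characterisation (tracks only getD) =====

lemma pvB_word (ij : Int × Int) (L : List String) (hnd : L.Nodup) :
    ∀ (d : PySem.Dict String (List (Int × Int))) (k : String),
      (L.foldl (fun d s => d.modify s [] (fun l => l ++ [ij])) d).getD k []
        = d.getD k [] ++ (if k ∈ L then [ij] else []) := by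
  induction L with
  | nil => intro d k; simp
  | cons s L ih =>
      intro d k
      have hndL : L.Nodup := (List.nodup_cons.mp hnd).2
      have hsL : s ∉ L := (List.nodup_cons.mp hnd).1
      simp only [List.foldl_cons]
      rw [ih hndL]
      by_cases hks : k = s
      · subst hks
        rw [pvGetD_modify_self, if_neg (fun h => hsL h), if_pos List.mem_cons_self]
        simp
      · rw [pvGetD_modify_ne d s k [] _ hks]
        by_cases hkL : k ∈ L
        · rw [if_pos hkL, if_pos (List.mem_cons_of_mem _ hkL)]
        · rw [if_neg hkL, if_neg (by simp [List.mem_cons, hks, hkL])]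
        
lemma pvB_sent (i : Int) (ws : List String) :
    ∀ (j : Int) (d : PySem.Dict String (List (Int × Int))) (k : String),
      ((PySem.List.enumerate ws j).foldl (fun d q =>
          (pvSubs q.2).foldl (fun d s => d.modify s [] (fun l => l ++ [(i, q.1)])) d) d).getD k []
        = d.getD k [] ++ pvMatchS k i j ws := by
  induction ws with
  | nil => intro j d k; simp [PySem.List.enumerate_nil, pvMatchS_nil]
  | cons w ws ih =>
      intro j d k
      rw [PySem.List.enumerate_cons]
      simp only [List.foldl_cons]
      rw [ih, pvB_word (i, j) (pvSubs w) (PySem.List.nodup_dedup _), pvMatchS_cons]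
      by_cases hin : PySem.Str.isIn k w = true
      · rw [if_pos ((pvMem_pvSubs k w).mpr hin), if_pos hin, List.append_assoc]
      · rw [if_neg (fun h => hin ((pvMem_pvSubs k w).mp h)), if_neg hin]
        simp

lemma pvB_text (text : List (List String)) :
    ∀ (i : Int) (d : PySem.Dict String (List (Int × Int))) (k : String),
      ((PySem.List.enumerate text i).foldl (fun d p =>
          (PySem.List.enumerate p.2 0).foldl (fun d q =>
            (pvSubs q.2).foldl (fun d s => d.modify s [] (fun l => l ++ [(p.1, q.1)])) d) d) d).getD k []
        = d.getD k [] ++ pvMatchT k i text := by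
  induction text with
  | nil => intro i d k; simp [PySem.List.enumerate_nil, pvMatchT_nil]
  | cons s text ih =>
      intro i d k
      rw [PySem.List.enumerate_cons]
      simp only [List.foldl_cons]
      rw [ih, pvB_sent i s 0, pvMatchT_cons, List.append_assoc]

-- the final dictionary comprehension {k: f k for k in keywords}
lemma pvB_comp (f : String → List (Int × Int)) (keywords : List String) :
    ∀ (d : PySem.Dict String (List (Int × Int))) (k : String),
      (keywords.foldl (fun d k' => d.insert k' (f k')) d).get? k
        = if k ∈ keywords then some (f k) else d.get? k := by
  induction keywords with
  | nil => intro d k; simp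
  | cons k0 rest ih =>
      intro d k
      simp only [List.foldl_cons]
      rw [ih]
      by_cases hkr : k ∈ rest
      · rw [if_pos hkr, if_pos (List.mem_cons_of_mem _ hkr)]
      · rw [if_neg hkr]
        by_cases hk0 : k = k0
        · subst hk0
          rw [if_pos List.mem_cons_self, PySem.Dict.get?_insert_self]
        · rw [if_neg (by simp [List.mem_cons, hk0, hkr]), PySem.Dict.get?_insert_of_ne d _ hk0]

lemma pvB_eq (text : List (List String)) (keywords : List String) :
    index_keywords_alt text keywords
      = (PySem.List.dedup keywords).map (fun k => (k, pvMatchT k 0 text)) := by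
  unfold index_keywords_alt
  set inv := (PySem.List.enumerate text 0).foldl (fun inv p =>
      (PySem.List.enumerate p.2 0).foldl (fun inv q =>
        (pvSubs q.2).foldl (fun inv s =>
          inv.modify s [] (fun l => l ++ [(p.1, q.1)])) inv) inv)
    PySem.Dict.empty with hinv
  have hinvk : ∀ k, inv.getD k [] = pvMatchT k 0 text := by
    intro k
    rw [hinv, pvB_text text 0 PySem.Dict.empty k, PySem.Dict.getD_empty, List.nil_append]
  set dOut := keywords.foldl (fun d k => d.insert k (inv.getD k [])) PySem.Dict.empty with hdOut
  have hkeys : dOut.keys = PySem.List.dedup keywords := by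
    rw [hdOut, PySem.Dict.keys_foldl_insert keywords (fun _ k => inv.getD k []) PySem.Dict.empty,
      PySem.Dict.keys_empty, PySem.Set.update_nil_left, PySem.List.dedup_eq_ofList]
  have hnd : dOut.keys.Nodup := by rw [hkeys]; exact PySem.List.nodup_dedup keywords
  rw [PySem.Dict.items_eq_map_keys dOut hnd ([] : List (Int × Int)), hkeys]
  apply List.map_congr_left
  intro k hk
  have hkm : k ∈ keywords := (PySem.List.mem_dedup keywords k).mp hk
  rw [PySem.Dict.getD_eq_get?_getD, hdOut, pvB_comp (fun k => inv.getD k []) keywords _ k,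
    if_pos hkm, Option.getD_some, hinvk k]

-- ===== VERDICT (by name: the statement is the Claim_ definition above) =====
theorem index_keywords_spec : Claim_equal_index_keywords := by
  intro text keywords _
  unfold Spec_index_keywords
  rw [pvA_eq, pvB_eq]
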